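-- pv_equiv track=rewrite | github.com/bluet/proxybroker2 | proxybroker/provider_utils.py | _extract_proxy_from_mapping
-- ===== SOURCE A (Python) =====
-- def _extract_proxy_from_mapping(item, ip_fields, port_fields):
--     """Return first matching (ip, port) pair from mapping or None."""
--     for ip_field in ip_fields:
--         if ip_field not in item:
--             continue
--         for port_field in port_fields:
--             if port_field in item:
--                 return item[ip_field], str(item[port_field])
--     return None
-- ===== SOURCE B (Python) =====
-- def _extract_proxy_from_mapping(item, ip_fields, port_fields):
--     """Return first matching (ip, port) pair from mapping or None.
--
--     Two independent linear scans instead of A's nested loop: the port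
--     search never depended on which ip field matched.
--     """
--     first_ip = next((f for f in ip_fields if f in item), None)
--     first_port = next((f for f in port_fields if f in item), None)
--     if first_ip is not None and first_port is not None:
--         return item[first_ip], str(item[first_port])
--     return None
-- ===== Notes on version B (the rewrite author's own statement) =====
-- stated objective: simpler
-- what changed: Replaces the nested ip-by-port loop with two independent first-match scans (first ip field present, first port field present), exploiting that the port search does not depend on which ip field matched.
import Mathlib
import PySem

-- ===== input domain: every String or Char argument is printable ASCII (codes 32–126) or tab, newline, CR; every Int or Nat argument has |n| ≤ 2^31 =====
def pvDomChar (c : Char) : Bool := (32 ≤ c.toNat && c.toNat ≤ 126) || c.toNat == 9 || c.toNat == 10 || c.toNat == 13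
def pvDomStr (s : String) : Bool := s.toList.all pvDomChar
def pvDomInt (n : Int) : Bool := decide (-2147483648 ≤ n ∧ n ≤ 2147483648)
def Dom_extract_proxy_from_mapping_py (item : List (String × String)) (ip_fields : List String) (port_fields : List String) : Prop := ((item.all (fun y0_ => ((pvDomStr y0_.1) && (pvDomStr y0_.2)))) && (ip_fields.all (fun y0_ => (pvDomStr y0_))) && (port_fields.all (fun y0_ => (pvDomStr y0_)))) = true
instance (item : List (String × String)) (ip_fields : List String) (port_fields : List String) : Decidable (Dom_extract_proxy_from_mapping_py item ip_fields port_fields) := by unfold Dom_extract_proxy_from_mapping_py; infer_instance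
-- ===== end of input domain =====

-- B replaces A's nested ip-by-port loop with two independent first-match scans (simpler decomposition, same result).

-- Shared dict primitives on the assoc-list encoding of the Python dict (insertion order,
-- lookup = first match): 'k in item' and 'item[k]' (exact: guarded by membership wherever used,
-- so the default "" is never returned).
def pvContains (item : List (String × String)) (k : String) : Bool :=
  item.any (fun p => p.1 == k)

def pvLookupD (item : List (String × String)) (k : String) : String :=
  ((item.find? (fun p => p.1 == k)).map (fun p => p.2)).getD ""

-- ===== PORT A =====
-- inner 'for port_field in port_fields' loop; str(item[port_field]) is the identity on strings
def pvInnerA (item : List (String × String)) (ip_field : String) : List String → Option (String × String)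
  | [] => none
  | p :: ps =>
    if pvContains item p then some (pvLookupD item ip_field, pvLookupD item p)
    else pvInnerA item ip_field ps

-- outer 'for ip_field in ip_fields' loop
def pvOuterA (item : List (String × String)) (port_fields : List String) : List String → Option (String × String)
  | [] => none
  | ip :: rest =>
    if !(pvContains item ip) then pvOuterA item port_fields rest
    else
      match pvInnerA item ip port_fields with
      | some r => some r
      | none => pvOuterA item port_fields rest

def extract_proxy_from_mapping_py (item : List (String × String)) (ip_fields : List String) (port_fields : List String) : Option (String × String) :=
  pvOuterA item port_fields ip_fields

-- ===== PORT B =====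
-- two independent first-match scans, combined only at the end (next(...) = List.find?)
def extract_proxy_from_mapping_py_alt (item : List (String × String)) (ip_fields : List String) (port_fields : List String) : Option (String × String) :=
  let first_ip := ip_fields.find? (fun f => pvContains item f)
  let first_port := port_fields.find? (fun f => pvContains item f)
  match first_ip, first_port with
  | some ip, some p => some (pvLookupD item ip, pvLookupD item p)
  | _, _ => none

-- ===== PRECONDITION & SPEC =====
def Spec_extract_proxy_from_mapping_py (item : List (String × String)) (ip_fields : List String) (port_fields : List String) (out : Option (String × String)) : Prop := out = extract_proxy_from_mapping_py_alt item ip_fields port_fields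
instance (item : List (String × String)) (ip_fields : List String) (port_fields : List String) (out : Option (String × String)) : Decidable (Spec_extract_proxy_from_mapping_py item ip_fields port_fields out) := by unfold Spec_extract_proxy_from_mapping_py; infer_instance

-- ===== CLAIM (what is proved, stated in full; the proofs are below) =====
def Claim_equal_extract_proxy_from_mapping_py : Prop := ∀ (item : List (String × String)) (ip_fields : List String) (port_fields : List String), Dom_extract_proxy_from_mapping_py item ip_fields port_fields → Spec_extract_proxy_from_mapping_py item ip_fields port_fields (extract_proxy_from_mapping_py item ip_fields port_fields)

-- ===== LEMMAS AND PROOFS =====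

-- the inner loop is the first-match port scan, paired with the fixed ip value
theorem pvInnerA_eq (item : List (String × String)) (ip : String) (ports : List String) :
    pvInnerA item ip ports =
      (ports.find? (fun f => pvContains item f)).map
        (fun p => (pvLookupD item ip, pvLookupD item p)) := by
  induction ports with
  | nil => rfl
  | cons p ps ih =>
    simp only [pvInnerA, List.find?]
    by_cases h : pvContains item p
    · simp [h]
    · simp [h, ih]

-- if no port field is present the whole outer loop returns none
theorem pvOuterA_none (item : List (String × String)) (ports : List String)
    (h : ports.find? (fun f => pvContains item f) = none) :
    ∀ ips : List String, pvOuterA item ports ips = none := by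
  intro ips
  induction ips with
  | nil => rfl
  | cons ip rest ih =>
    simp only [pvOuterA, pvInnerA_eq, h]
    by_cases hc : pvContains item ip <;> simp [hc, ih]

-- ===== VERDICT (by name: the statement is the Claim_ definition above) =====
theorem extract_proxy_from_mapping_py_spec : Claim_equal_extract_proxy_from_mapping_py := by
  intro item ip_fields port_fields hD
  clear hD
  unfold Spec_extract_proxy_from_mapping_py extract_proxy_from_mapping_py extract_proxy_from_mapping_py_alt
  induction ip_fields with
  | nil => cases h : port_fields.find? (fun f => pvContains item f) <;> simp [pvOuterA]
  | cons ip rest ih =>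
    simp only [pvOuterA, pvInnerA_eq, List.find?]
    by_cases hc : pvContains item ip
    · simp only [hc, Bool.not_true, Bool.false_eq_true, if_false]
      cases h : port_fields.find? (fun f => pvContains item f) with
      | none => simp [pvOuterA_none item port_fields h]
      | some p => simp
    · simpa [hc] using ih
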